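-- pv_equiv track=rewrite | github.com/penguinc00kies/CSC110-Jamie | csc110/tests/term_test_2/q1.py | encrypt_tt2
-- ===== SOURCE A (Python) =====
-- def encrypt_tt2(k: int, plaintext: list[tuple[int, int, int, int, int]]) \
--         -> list[tuple[int, int, int, int, int]]:
--     """Return the ciphertext grade message when plaintext is encrypted with key k.
--
--     Preconditions:
--         - k and plaintext are valid inputs for encryption, based on the cryptosystem description
--
--     >>> key = 10
--     >>> p = [(95, 90, 67, 75, 89), (55, 64, 78, 92, 86)]
--     >>> encrypt_tt2(key, p)
--     [(69, 19, 86, 67, 7), (65, 56, 97, 39, 78)]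
--     """
--     ciphertext = []
--     for grade_set in plaintext:
--         cipher_grade_set = ()
--
--         for grade in grade_set:
--             cipher_grade_set = cipher_grade_set + ((reverse_number(grade) + k) % 101, )
--         ciphertext.append(cipher_grade_set)
--
--     return ciphertext
--
-- def reverse_number(num: int) -> int:
--     """Return the number with the order of its digits reversed"""
--     num_string = str(num)
--     reversed_num = ''
--     for char in num_string:
--         reversed_num = char + reversed_num
--     if reversed_num[-1] == '-':
--         reversed_num = reversed_num.strip('-')
--         reversed_num = '-' + reversed_num
--
--     return int(reversed_num)
-- ===== SOURCE B (Python) =====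
-- def reverse_number(num: int) -> int:
--     """Return the number with the order of its digits reversed."""
--     r = int(str(abs(num))[::-1])
--     return -r if num < 0 else r
--
--
-- def encrypt_tt2(k: int, plaintext: list) -> list:
--     """Return the ciphertext grade message when plaintext is encrypted with key k."""
--     return [tuple((reverse_number(g) + k) % 101 for g in gs) for gs in plaintext]
-- ===== Notes on version B (the rewrite author's own statement) =====
-- stated objective: idiomatic
-- what changed: reverse_number handles the sign arithmetically up front (abs, then negate the result) and reverses with a slice instead of a char-prepend loop plus last-char '-' check and strip; the outer nested loops with tuple concatenation become a list/tuple comprehension.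
import Mathlib
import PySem

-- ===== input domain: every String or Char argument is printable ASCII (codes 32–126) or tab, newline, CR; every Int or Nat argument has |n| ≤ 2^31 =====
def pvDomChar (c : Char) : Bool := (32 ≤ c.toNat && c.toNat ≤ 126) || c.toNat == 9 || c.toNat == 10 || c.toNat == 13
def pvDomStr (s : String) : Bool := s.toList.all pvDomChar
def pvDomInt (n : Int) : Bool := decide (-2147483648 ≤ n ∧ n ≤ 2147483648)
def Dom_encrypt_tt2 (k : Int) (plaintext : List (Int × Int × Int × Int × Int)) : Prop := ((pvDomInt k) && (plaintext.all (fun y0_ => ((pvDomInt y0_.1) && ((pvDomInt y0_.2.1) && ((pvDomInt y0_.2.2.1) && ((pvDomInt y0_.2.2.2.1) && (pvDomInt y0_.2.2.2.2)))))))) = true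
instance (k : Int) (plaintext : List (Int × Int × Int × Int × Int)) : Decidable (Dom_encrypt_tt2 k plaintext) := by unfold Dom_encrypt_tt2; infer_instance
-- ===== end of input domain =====

-- B rewrites reverse_number to handle the sign arithmetically (abs then negate) with a slice
-- reversal, replacing A's char-prepend loop plus last-char '-' check and strip; the outer
-- loops become a map (objective: idiomatic; same return value, no side effects).

-- ===== PORT A =====
-- reverse_number: str(num); prepend-loop reversal; if last char is '-', strip '-' and re-prepend; int()
def reverseNumber (num : Int) : Int :=
  let numString := PySem.Int.toChars num
  let reversedNum := numString.foldl (fun acc ch => ch :: acc) ([] : List Char)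
  let reversedNum :=
    if PySem.List.pyGetD reversedNum (-1) ' ' = '-' then
      '-' :: PySem.Chars.stripChars reversedNum ['-']
    else reversedNum
  -- int(reversed_num); str(num) is never empty and stays int-parsable after this rearrangement,
  -- so the `none` (ValueError) case is unreachable
  (PySem.Int.ofChars? reversedNum).getD 0

def encrypt_tt2 (k : Int) (plaintext : List (Int × Int × Int × Int × Int)) : List (Int × Int × Int × Int × Int) :=
  plaintext.foldl (fun ciphertext gs =>
    ciphertext ++ [(PySem.Int.mod (reverseNumber gs.1 + k) 101,
                    PySem.Int.mod (reverseNumber gs.2.1 + k) 101,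
                    PySem.Int.mod (reverseNumber gs.2.2.1 + k) 101,
                    PySem.Int.mod (reverseNumber gs.2.2.2.1 + k) 101,
                    PySem.Int.mod (reverseNumber gs.2.2.2.2 + k) 101)]) []

-- ===== PORT B =====
-- reverse_number: r = int(str(abs(num))[::-1]); return -r if num < 0 else r
def reverseNumberAlt (num : Int) : Int :=
  -- int(...): str(abs(num)) reversed is a nonempty digit string, so `none` is unreachable
  let r := (PySem.Int.ofChars?
      ((PySem.List.slice? (PySem.Int.toChars |num|) none none (-1)).getD [])).getD 0
  if num < 0 then -r else r

def encrypt_tt2_alt (k : Int) (plaintext : List (Int × Int × Int × Int × Int)) : List (Int × Int × Int × Int × Int) :=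
  plaintext.map (fun gs =>
    (PySem.Int.mod (reverseNumberAlt gs.1 + k) 101,
     PySem.Int.mod (reverseNumberAlt gs.2.1 + k) 101,
     PySem.Int.mod (reverseNumberAlt gs.2.2.1 + k) 101,
     PySem.Int.mod (reverseNumberAlt gs.2.2.2.1 + k) 101,
     PySem.Int.mod (reverseNumberAlt gs.2.2.2.2 + k) 101))

-- ===== PRECONDITION & SPEC =====
def Spec_encrypt_tt2 (k : Int) (plaintext : List (Int × Int × Int × Int × Int)) (out : List (Int × Int × Int × Int × Int)) : Prop := out = encrypt_tt2_alt k plaintext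
instance (k : Int) (plaintext : List (Int × Int × Int × Int × Int)) (out : List (Int × Int × Int × Int × Int)) : Decidable (Spec_encrypt_tt2 k plaintext out) := by unfold Spec_encrypt_tt2; infer_instance

-- ===== CLAIM (what is proved, stated in full; the proofs are below) =====
def Claim_equal_encrypt_tt2 : Prop := ∀ (k : Int) (plaintext : List (Int × Int × Int × Int × Int)), Dom_encrypt_tt2 k plaintext → Spec_encrypt_tt2 k plaintext (encrypt_tt2 k plaintext)

-- ===== LEMMAS AND PROOFS =====

-- every character produced by Nat.toDigitsCore 10 on a digit accumulator is a decimal digit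
lemma toDigitsCore_isDigit : ∀ (f n : Nat) (ds : List Char),
    (∀ c ∈ ds, c.isDigit = true) → ∀ c ∈ Nat.toDigitsCore 10 f n ds, c.isDigit = true := by
  intro f
  induction f with
  | zero => intro n ds h; simpa [Nat.toDigitsCore] using h
  | succ f ih =>
    intro n ds h c
    have hd : (n % 10).digitChar.isDigit = true := by
      have : n % 10 < 10 := Nat.mod_lt _ (by omega)
      interval_cases (n % 10) <;> decide
    simp only [Nat.toDigitsCore]
    split
    · intro hc
      rw [List.mem_cons] at hc
      rcases hc with rfl | hc
      · exact hd
      · exact h _ hc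
    · intro hc
      refine ih _ _ ?_ _ hc
      intro x hx
      rw [List.mem_cons] at hx
      rcases hx with rfl | hx
      · exact hd
      · exact h _ hx

lemma toDigitsCore_ne_nil : ∀ (f n : Nat) (ds : List Char),
    ds ≠ [] → Nat.toDigitsCore 10 f n ds ≠ [] := by
  intro f
  induction f with
  | zero => intro n ds h; simpa [Nat.toDigitsCore] using h
  | succ f ih =>
    intro n ds h
    simp only [Nat.toDigitsCore]
    split
    · simp
    · exact ih _ _ (by simp)

lemma toDigits_isDigit (n : Nat) : ∀ c ∈ Nat.toDigits 10 n, c.isDigit = true :=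
  toDigitsCore_isDigit _ _ _ (by simp)

lemma toDigits_ne_nil (n : Nat) : Nat.toDigits 10 n ≠ [] := by
  unfold Nat.toDigits
  simp only [Nat.toDigitsCore]
  split
  · simp
  · exact toDigitsCore_ne_nil _ _ _ (by simp)

lemma isIntSpace_of_isDigit {c : Char} (h : c.isDigit = true) :
    PySem.Int.isIntSpace c = false := by
  simp only [PySem.Int.isIntSpace, Bool.or_eq_false_iff, decide_eq_false_iff_not]
  refine ⟨⟨⟨⟨⟨?_, ?_⟩, ?_⟩, ?_⟩, ?_⟩, ?_⟩ <;> (rintro rfl; exact absurd h (by decide))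

lemma dropWhile_isIntSpace_digits (l : List Char) (h : ∀ c ∈ l, c.isDigit = true) :
    l.dropWhile PySem.Int.isIntSpace = l := by
  cases l with
  | nil => rfl
  | cons c cs =>
    simp [isIntSpace_of_isDigit (h c (by simp))]

-- int('-' + x) = -int(x) for a nonempty all-digit string x
lemma ofChars?_neg_digits (c : Char) (ds : List Char)
    (hc : c.isDigit = true) (hds : ∀ x ∈ c :: ds, x.isDigit = true) :
    PySem.Int.ofChars? ('-' :: c :: ds) = Option.map (fun v : Int => -v) (PySem.Int.ofChars? (c :: ds)) := by
  have hrev : ∀ x ∈ (c :: ds).reverse, x.isDigit = true := by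
    intro x hx; exact hds x (by simpa using List.mem_reverse.mp hx)
  obtain ⟨e, rest, hE⟩ := List.exists_cons_of_ne_nil (by simp : (c :: ds).reverse ≠ [])
  have he : e.isDigit = true := hrev e (by rw [hE]; simp)
  have h1 : List.dropWhile PySem.Int.isIntSpace ('-' :: c :: ds) = '-' :: c :: ds := by
    simp [PySem.Int.isIntSpace]
  have h2 : List.dropWhile PySem.Int.isIntSpace (('-' :: c :: ds).reverse)
      = ('-' :: c :: ds).reverse := by
    rw [List.reverse_cons, hE]
    simp [isIntSpace_of_isDigit he]
  have hcs : (List.dropWhile PySem.Int.isIntSpace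
      (List.dropWhile PySem.Int.isIntSpace ('-' :: c :: ds)).reverse).reverse = '-' :: c :: ds := by
    rw [h1, h2, List.reverse_reverse]
  have hcs' : (List.dropWhile PySem.Int.isIntSpace
      (List.dropWhile PySem.Int.isIntSpace (c :: ds)).reverse).reverse = c :: ds := by
    rw [dropWhile_isIntSpace_digits _ hds, dropWhile_isIntSpace_digits _ hrev, List.reverse_reverse]
  unfold PySem.Int.ofChars?
  rw [hcs, hcs']
  rw [PySem.Int.ofChars?.match_1.eq_1, PySem.Int.ofChars?.match_1.eq_3]
  · simp
  · intro ds' h; injection h with h1 _; subst h1; exact absurd hc (by decide)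
  · intro ds' h; injection h with h1 _; subst h1; exact absurd hc (by decide)

lemma foldl_prepend_eq_reverse (cs : List Char) :
    cs.foldl (fun acc ch => ch :: acc) ([] : List Char) = cs.reverse := by
  simp [← List.foldr_reverse]

lemma contains_dash_of_digit {x : Char} (h : x.isDigit = true) :
    (['-'] : List Char).contains x = false := by
  simp only [List.contains_cons, List.contains_nil, Bool.or_false, beq_eq_false_iff_ne, ne_eq]
  rintro rfl; exact absurd h (by decide)

lemma dropWhile_dash_digits (l : List Char) (h : ∀ x ∈ l, x.isDigit = true) :
    List.dropWhile (fun c => (['-'] : List Char).contains c) l = l := by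
  cases l with
  | nil => rfl
  | cons x xs =>
    rw [List.dropWhile_cons,
      show ((['-'] : List Char).contains x) = false from contains_dash_of_digit (h x (by simp))]
    simp

lemma reverseNumber_eq (num : Int) : reverseNumber num = reverseNumberAlt num := by
  by_cases h : num < 0
  · have habs : |num| = (num.natAbs : Int) := Int.abs_eq_natAbs num
    have hDdig := toDigits_isDigit num.natAbs
    obtain ⟨c, ds, hcds⟩ := List.exists_cons_of_ne_nil (toDigits_ne_nil num.natAbs)
    have hchars : PySem.Int.toChars num = '-' :: Nat.toDigits 10 num.natAbs := by
      simp [PySem.Int.toChars, h]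
    set D := Nat.toDigits 10 num.natAbs with hDdef
    obtain ⟨e, rest, hE⟩ := List.exists_cons_of_ne_nil
      (by rw [hcds]; simp : D.reverse ≠ [])
    have he : e.isDigit = true := by
      have : e ∈ D := List.mem_reverse.mp (by rw [hE]; simp)
      exact hDdig e this
    have hrevdig : ∀ x ∈ e :: rest, x.isDigit = true := by
      intro x hx
      exact hDdig x (List.mem_reverse.mp (by rw [hE]; exact hx))
    -- A's side
    have hfold : (PySem.Int.toChars num).foldl (fun acc ch => ch :: acc) ([] : List Char)
        = D.reverse ++ ['-'] := by
      rw [hchars, foldl_prepend_eq_reverse, List.reverse_cons]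
    have hlast : PySem.List.pyGetD (D.reverse ++ ['-']) (-1) ' ' = '-' :=
      PySem.List.pyGetD_neg_one_append_singleton _ _ _
    have hstrip : PySem.Chars.stripChars (D.reverse ++ ['-']) ['-'] = D.reverse := by
      unfold PySem.Chars.stripChars
      rw [hE, List.cons_append]
      show (List.dropWhile (fun c => (['-'] : List Char).contains c)
          (List.dropWhile (fun c => (['-'] : List Char).contains c) (e :: (rest ++ ['-']))).reverse).reverse
          = e :: rest
      rw [List.dropWhile_cons]
      rw [show ((['-'] : List Char).contains e) = false from contains_dash_of_digit he]
      simp only [Bool.false_eq_true, if_false, List.reverse_cons, List.reverse_append,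
        List.reverse_cons, List.reverse_nil, List.nil_append, List.cons_append]
      -- now : dropWhile p ('-' :: (rest.reverse ++ [e])) ; p '-' = true
      rw [List.dropWhile_cons]
      rw [show ((['-'] : List Char).contains '-') = true from by decide]
      simp only [if_true]
      rw [dropWhile_dash_digits _ (by
        intro x hx
        rcases List.mem_append.mp hx with hx | hx
        · exact hrevdig x (by simp [List.mem_reverse.mp hx])
        · exact hrevdig x (by simp at hx; simp [hx]))]
      simp
    have htc : PySem.Int.toChars |num| = D := by
      have hnl : ¬ (|num| < 0) := not_lt.mpr (abs_nonneg num)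
      simp only [PySem.Int.toChars, hnl, if_false, hDdef]
      rw [show |num|.toNat = num.natAbs by rw [abs_of_neg h]; omega]
    unfold reverseNumber reverseNumberAlt
    simp only [hfold]
    rw [if_pos hlast, hstrip, htc]
    simp only [PySem.List.slice?_none_none_neg_one, Option.getD_some]
    rw [if_pos h, hE]
    rw [ofChars?_neg_digits e rest he hrevdig]
    cases PySem.Int.ofChars? (e :: rest) <;> simp
  · have hnn : (0 : Int) ≤ num := by omega
    have habs : |num| = num := abs_of_nonneg hnn
    have hDdig : ∀ c ∈ Nat.toDigits 10 num.toNat, c.isDigit = true := toDigits_isDigit num.toNat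
    obtain ⟨c, ds, hcds⟩ := List.exists_cons_of_ne_nil (toDigits_ne_nil num.toNat)
    have hchars : PySem.Int.toChars num = Nat.toDigits 10 num.toNat := by
      simp [PySem.Int.toChars, h]
    have hfold : (PySem.Int.toChars num).foldl (fun acc ch => ch :: acc) ([] : List Char)
        = ds.reverse ++ [c] := by
      rw [hchars, foldl_prepend_eq_reverse, hcds, List.reverse_cons]
    have hlast : PySem.List.pyGetD (ds.reverse ++ [c]) (-1) ' ' = c :=
      PySem.List.pyGetD_neg_one_append_singleton _ _ _
    have hcne : ¬ (PySem.List.pyGetD (ds.reverse ++ [c]) (-1) ' ' = '-') := by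
      rw [hlast]
      have := hDdig c (by rw [hcds]; simp)
      rintro rfl; exact absurd this (by decide)
    unfold reverseNumber reverseNumberAlt
    simp only [hfold]
    rw [if_neg hcne]
    rw [habs, hchars, hcds]
    simp only [PySem.List.slice?_none_none_neg_one, Option.getD_some, List.reverse_cons]
    rw [if_neg h]

-- ===== VERDICT (by name: the statement is the Claim_ definition above) =====
theorem encrypt_tt2_spec : Claim_equal_encrypt_tt2 := by
  intro k plaintext _
  unfold Spec_encrypt_tt2 encrypt_tt2 encrypt_tt2_alt
  rw [PySem.List.foldl_append_singleton_eq_map]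
  simp [reverseNumber_eq]
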